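-- pv_equiv track=rewrite | github.com/kazuhiko1979/edabit_2 | 128_Sums_of_Powers_of_Two.py | sums_of_powers_of_two
-- ===== SOURCE A (Python) =====
-- def sums_of_powers_of_two(n):
--
--     result = []
--     power = 0
--
--     while n > 0:
--         # 奇数か偶数か判定（ビット）
--         if n & 1:
--             result.append(2 ** power)
--         power += 1
--         # ビット右にシフト（数値を2で割ると同等）
--         n >>= 1
--     return result
-- ===== SOURCE B (Python) =====
-- def sums_of_powers_of_two(n):
--     result = []
--     while n > 0:
--         low = n & -n      # lowest set bit = smallest power-of-two summand
--         result.append(low)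
--         n -= low
--     return result
-- ===== Notes on version B (the rewrite author's own statement) =====
-- stated objective: alternative
-- what changed: B isolates the lowest set bit with n & -n and subtracts it each round (one iteration per summand), instead of A's per-bit walk with a power counter, a parity test and a right shift every iteration.
import Mathlib
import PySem

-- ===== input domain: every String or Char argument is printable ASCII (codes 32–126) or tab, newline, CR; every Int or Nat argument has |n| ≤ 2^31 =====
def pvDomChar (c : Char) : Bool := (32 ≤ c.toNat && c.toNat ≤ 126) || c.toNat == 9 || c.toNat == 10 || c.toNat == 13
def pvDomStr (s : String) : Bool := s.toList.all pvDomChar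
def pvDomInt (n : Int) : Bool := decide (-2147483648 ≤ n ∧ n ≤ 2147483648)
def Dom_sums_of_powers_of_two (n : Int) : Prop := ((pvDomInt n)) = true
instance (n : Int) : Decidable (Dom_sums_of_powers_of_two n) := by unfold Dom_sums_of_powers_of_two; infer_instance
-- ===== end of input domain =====

-- B lists the powers of two summing to n by isolating the lowest set bit (n & -n) each
-- round instead of A's per-bit walk with a power counter; alternative algorithm, same output.


-- ===== PORT A =====
-- termination helper for both loops: the loop variable strictly shrinks
theorem pv_shiftRight_one_toNat_lt (n : Int) (h : 0 < n) : (n >>> 1).toNat < n.toNat := by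
  cases n with
  | ofNat m =>
    have h1 : (Int.ofNat m) >>> 1 = Int.ofNat (m / 2) := by
      show Int.ofNat (m >>> 1) = Int.ofNat (m / 2)
      rw [Nat.shiftRight_one]
    have h2 : 0 < m := by rw [Int.ofNat_eq_natCast] at h; exact_mod_cast h
    rw [h1]
    show m / 2 < m
    omega
  | negSucc m => exact absurd h (by omega)

-- A's loop: `power` is the bit index; it starts at 0 and only increments, so it is a Nat here.
def powLoopA (n : Int) (result : List Int) (power : Nat) : List Int :=
  if h : 0 < n then
    powLoopA (n >>> 1)
      (if PySem.Int.band n 1 ≠ 0 then result ++ [(2 : Int) ^ power] else result)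
      (power + 1)
  else result
termination_by n.toNat
decreasing_by exact pv_shiftRight_one_toNat_lt n h

def sums_of_powers_of_two (n : Int) : List Int := powLoopA n [] 0

-- ===== PORT B =====
theorem pv_band_neg_of_pos (n : Int) (h : 0 < n) :
    PySem.Int.band n (-n) = ((n.toNat - (n.toNat &&& (n.toNat - 1)) : Nat) : Int) := by
  unfold PySem.Int.band
  rw [if_pos (by omega), if_neg (by omega)]
  have h1 : (-(-n) - 1).toNat = n.toNat - 1 := by omega
  rw [h1]

theorem pv_band_neg_self_pos (n : Int) (h : 0 < n) : 0 < PySem.Int.band n (-n) := by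
  rw [pv_band_neg_of_pos n h]
  have h1 : n.toNat &&& (n.toNat - 1) ≤ n.toNat - 1 := Nat.and_le_right
  have h2 : 0 < n.toNat := by omega
  omega

def powLoopB (n : Int) (result : List Int) : List Int :=
  if h : 0 < n then
    let low := PySem.Int.band n (-n)
    powLoopB (n - low) (result ++ [low])
  else result
termination_by n.toNat
decreasing_by have := pv_band_neg_self_pos n h; omega

def sums_of_powers_of_two_alt (n : Int) : List Int := powLoopB n []

-- ===== PRECONDITION & SPEC =====
def Spec_sums_of_powers_of_two (n : Int) (out : List Int) : Prop := out = sums_of_powers_of_two_alt n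
instance (n : Int) (out : List Int) : Decidable (Spec_sums_of_powers_of_two n out) := by unfold Spec_sums_of_powers_of_two; infer_instance

-- ===== CLAIM (what is proved, stated in full; the proofs are below) =====
def Claim_equal_sums_of_powers_of_two : Prop := ∀ (n : Int), Dom_sums_of_powers_of_two n → Spec_sums_of_powers_of_two n (sums_of_powers_of_two n)

-- ===== LEMMAS AND PROOFS =====

-- Nat-level: lowest set bit as m - (m &&& (m-1))
theorem pv_and_pred_odd (m : Nat) (h : m % 2 = 1) : m &&& (m - 1) = m - 1 := by
  apply Nat.eq_of_testBit_eq
  intro i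
  cases i with
  | zero =>
    have h0 : (m - 1) % 2 = 0 := by omega
    simp [Nat.testBit_zero, h0]
  | succ i =>
    have h0 : (m - 1) / 2 = m / 2 := by omega
    simp only [Nat.testBit_and]
    simp [Nat.testBit_succ, h0]

theorem pv_and_pred_even (k : Nat) (h : 0 < k) :
    (2 * k) &&& (2 * k - 1) = 2 * (k &&& (k - 1)) := by
  apply Nat.eq_of_testBit_eq
  intro i
  cases i with
  | zero =>
    have h0 : (2 * k) % 2 = 0 := by omega
    have h1 : (2 * (k &&& (k - 1))) % 2 = 0 := by omega
    simp [Nat.testBit_zero, h0, h1]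
  | succ i =>
    have h0 : (2 * k) / 2 = k := by omega
    have h1 : (2 * k - 1) / 2 = k - 1 := by omega
    have h2 : (2 * (k &&& (k - 1))) / 2 = k &&& (k - 1) := by omega
    simp only [Nat.testBit_and]
    simp [Nat.testBit_succ, h0, h1, h2]

theorem pv_shiftRight_one (n : Int) (h : 0 ≤ n) : n >>> 1 = ((n.toNat / 2 : Nat) : Int) := by
  cases n with
  | ofNat m =>
    show Int.ofNat (m >>> 1) = _
    rw [Nat.shiftRight_one]
    rfl
  | negSucc m => exact absurd h (by simp)

theorem pv_band_one (n : Int) (h : 0 ≤ n) : PySem.Int.band n 1 = ((n.toNat % 2 : Nat) : Int) := by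
  rw [PySem.Int.band_of_nonneg h (by omega)]
  norm_num [Nat.and_one_is_mod]

-- one-step unfolding lemmas for the two loops
theorem powLoopA_nil (n : Int) (result : List Int) (power : Nat) (h : ¬ 0 < n) :
    powLoopA n result power = result := by
  rw [powLoopA]; simp [h]

theorem powLoopA_step (n : Int) (result : List Int) (power : Nat) (h : 0 < n) :
    powLoopA n result power
      = powLoopA (n >>> 1)
          (if PySem.Int.band n 1 ≠ 0 then result ++ [(2 : Int) ^ power] else result)
          (power + 1) := by
  rw [powLoopA]; simp [h]

theorem powLoopB_nil (n : Int) (result : List Int) (h : ¬ 0 < n) :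
    powLoopB n result = result := by
  rw [powLoopB]; simp [h]

theorem powLoopB_step (n : Int) (result : List Int) (h : 0 < n) :
    powLoopB n result
      = powLoopB (n - PySem.Int.band n (-n)) (result ++ [PySem.Int.band n (-n)]) := by
  rw [powLoopB]; simp [h]

-- accumulator lemmas
theorem powLoopA_acc (n : Int) (result : List Int) (power : Nat) :
    powLoopA n result power = result ++ powLoopA n [] power := by
  generalize hf : n.toNat = f
  induction f using Nat.strong_induction_on generalizing n result power with
  | _ f IH =>
    by_cases h : 0 < n
    · subst hf
      rw [powLoopA_step n result power h, powLoopA_step n [] power h,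
          IH (n >>> 1).toNat (pv_shiftRight_one_toNat_lt n h) _ _ _ rfl,
          IH (n >>> 1).toNat (pv_shiftRight_one_toNat_lt n h) (n >>> 1)
            (if PySem.Int.band n 1 ≠ 0 then [] ++ [(2 : Int) ^ power] else []) (power + 1) rfl]
      split_ifs <;> simp
    · rw [powLoopA_nil n result power h, powLoopA_nil n [] power h]; simp

theorem powLoopB_acc (n : Int) (result : List Int) :
    powLoopB n result = result ++ powLoopB n [] := by
  generalize hf : n.toNat = f
  induction f using Nat.strong_induction_on generalizing n result with
  | _ f IH =>
    by_cases h : 0 < n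
    · subst hf
      have hd : (n - PySem.Int.band n (-n)).toNat < n.toNat := by
        have := pv_band_neg_self_pos n h; omega
      rw [powLoopB_step n result h, powLoopB_step n [] h,
          IH _ hd _ (result ++ [PySem.Int.band n (-n)]) rfl,
          IH _ hd _ ([] ++ [PySem.Int.band n (-n)]) rfl]
      simp
    · rw [powLoopB_nil n result h, powLoopB_nil n [] h]; simp

theorem powLoopA_shift (n : Int) (power : Nat) :
    powLoopA n [] (power + 1) = (powLoopA n [] power).map (· * 2) := by
  generalize hf : n.toNat = f
  induction f using Nat.strong_induction_on generalizing n power with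
  | _ f IH =>
    by_cases h : 0 < n
    · subst hf
      rw [powLoopA_step n [] (power + 1) h, powLoopA_step n [] power h,
          powLoopA_acc, powLoopA_acc (n >>> 1)
            (if PySem.Int.band n 1 ≠ 0 then [] ++ [(2 : Int) ^ power] else []),
          IH (n >>> 1).toNat (pv_shiftRight_one_toNat_lt n h) _ _ rfl]
      split_ifs <;> simp [pow_succ]
    · rw [powLoopA_nil n [] (power + 1) h, powLoopA_nil n [] power h]; simp

theorem powLoopB_double (k : Int) :
    powLoopB (2 * k) [] = (powLoopB k []).map (· * 2) := by
  generalize hf : k.toNat = f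
  induction f using Nat.strong_induction_on generalizing k with
  | _ f IH =>
    by_cases h : 0 < k
    · have h2 : 0 < 2 * k := by omega
      have hkt : 0 < k.toNat := by omega
      have hlow : PySem.Int.band (2 * k) (-(2 * k)) = 2 * PySem.Int.band k (-k) := by
        rw [pv_band_neg_of_pos _ h2, pv_band_neg_of_pos _ h]
        have ht : (2 * k).toNat = 2 * k.toNat := by omega
        rw [ht, pv_and_pred_even k.toNat hkt]
        have hle : k.toNat &&& (k.toNat - 1) ≤ k.toNat - 1 := Nat.and_le_right
        omega
      have hd : (k - PySem.Int.band k (-k)).toNat < k.toNat := by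
        have := pv_band_neg_self_pos k h; omega
      have harg : 2 * k - PySem.Int.band (2 * k) (-(2 * k))
          = 2 * (k - PySem.Int.band k (-k)) := by rw [hlow]; ring
      subst hf
      rw [powLoopB_step (2 * k) [] h2, powLoopB_step k [] h,
          harg, powLoopB_acc, powLoopB_acc (k - PySem.Int.band k (-k)),
          IH _ hd _ rfl, hlow]
      simp [mul_comm]
    · have h2 : ¬ 0 < 2 * k := by omega
      rw [powLoopB_nil _ [] h, powLoopB_nil _ [] h2]; simp

theorem pv_main (n : Int) : powLoopA n [] 0 = powLoopB n [] := by
  generalize hf : n.toNat = f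
  induction f using Nat.strong_induction_on generalizing n with
  | _ f IH =>
    by_cases h : 0 < n
    · have hsh : n >>> 1 = ((n.toNat / 2 : Nat) : Int) := pv_shiftRight_one n (by omega)
      have hA : powLoopA n [] 0
          = (if PySem.Int.band n 1 ≠ 0 then [(2 : Int) ^ 0] else []) ++
            (powLoopB ((n.toNat / 2 : Nat) : Int) []).map (· * 2) := by
        rw [powLoopA_step n [] 0 h, powLoopA_acc, powLoopA_shift]
        subst hf
        rw [IH (n >>> 1).toNat (pv_shiftRight_one_toNat_lt n h) _ rfl, hsh]
        split_ifs <;> simp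
      rw [hA, pv_band_one n (by omega)]
      by_cases hodd : n.toNat % 2 = 1
      · have hif : ((((n.toNat % 2 : Nat)) : Int) ≠ 0) := by omega
        rw [if_pos hif]
        have hlow : PySem.Int.band n (-n) = 1 := by
          rw [pv_band_neg_of_pos n h, pv_and_pred_odd n.toNat hodd]
          have he : n.toNat - (n.toNat - 1) = 1 := by omega
          rw [he]; rfl
        have hB : powLoopB n [] = [(1 : Int)] ++ (powLoopB ((n.toNat / 2 : Nat) : Int) []).map (· * 2) := by
          rw [powLoopB_step n [] h, hlow, powLoopB_acc]
          have harg : n - 1 = 2 * ((n.toNat / 2 : Nat) : Int) := by omega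
          rw [harg, powLoopB_double]
          simp
        rw [hB]
        simp
      · have hif : ¬ ((((n.toNat % 2 : Nat)) : Int) ≠ 0) := by omega
        rw [if_neg hif]
        have harg : n = 2 * ((n.toNat / 2 : Nat) : Int) := by omega
        have hB : powLoopB n [] = (powLoopB ((n.toNat / 2 : Nat) : Int) []).map (· * 2) := by
          conv_lhs => rw [harg]
          rw [powLoopB_double]
        rw [hB]
        simp
    · rw [powLoopA_nil n [] 0 h, powLoopB_nil n [] h]

-- ===== VERDICT (by name: the statement is the Claim_ definition above) =====
theorem sums_of_powers_of_two_spec : Claim_equal_sums_of_powers_of_two := by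
  intro n _
  show sums_of_powers_of_two n = sums_of_powers_of_two_alt n
  exact pv_main n
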